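-- pv_equiv track=rewrite | github.com/keejkrej/cell-lisca | src/migrama/analyze/core.py | _find_longest_run
-- ===== SOURCE A (Python) =====
-- def _find_longest_run(counts: list[int], target: int) -> tuple[int, int]:
--     """Find longest contiguous run of target counts."""
--     best_start = -1
--     best_end = -1
--     best_len = 0
--     current_start: int | None = None
--
--     for idx, count in enumerate(counts):
--         if count == target:
--             if current_start is None:
--                 current_start = idx
--         elif current_start is not None:
--             current_end = idx - 1
--             length = current_end - current_start + 1
--             if length > best_len:
--                 best_len = length
--                 best_start = current_start
--                 best_end = current_end
--             current_start = None
--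
--     if current_start is not None:
--         current_end = len(counts) - 1
--         length = current_end - current_start + 1
--         if length > best_len:
--             best_len = length
--             best_start = current_start
--             best_end = current_end
--
--     if best_len == 0:
--         return -1, -1
--
--     return best_start, best_end
-- ===== SOURCE B (Python) =====
-- def _find_longest_run(counts: list[int], target: int) -> tuple[int, int]:
--     """Find longest contiguous run of target counts (run-splitting scan)."""
--     best_start, best_end, best_len = -1, -1, 0
--     i, n = 0, len(counts)
--     while i < n:
--         j = i + 1
--         while j < n and counts[j] == counts[i]:
--             j += 1
--         if counts[i] == target and j - i > best_len:
--             best_len = j - i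
--             best_start, best_end = i, j - 1
--         i = j
--     return best_start, best_end
-- ===== Notes on version B (the rewrite author's own statement) =====
-- stated objective: alternative
-- what changed: B splits the list into maximal runs of equal values (two-level index scan over whole runs) and compares each target-run against the best directly, replacing A's per-element current_start/None state machine and its post-loop flush.
import Mathlib
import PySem

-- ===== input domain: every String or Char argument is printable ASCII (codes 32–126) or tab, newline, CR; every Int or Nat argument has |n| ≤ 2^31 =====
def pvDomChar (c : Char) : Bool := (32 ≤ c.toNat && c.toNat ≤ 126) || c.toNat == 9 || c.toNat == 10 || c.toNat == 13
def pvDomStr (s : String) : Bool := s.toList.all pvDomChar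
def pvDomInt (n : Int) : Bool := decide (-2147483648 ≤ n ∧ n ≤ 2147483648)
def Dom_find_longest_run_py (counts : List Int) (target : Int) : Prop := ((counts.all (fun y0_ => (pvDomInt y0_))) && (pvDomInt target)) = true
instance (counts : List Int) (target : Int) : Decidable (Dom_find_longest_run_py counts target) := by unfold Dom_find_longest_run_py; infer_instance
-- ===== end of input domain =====

-- B replaces A's per-element current_start/None state machine (with its post-loop
-- flush) by a scan over maximal runs of equal values; alternative decomposition, same cost.

-- ===== PORT A =====
-- one loop step: state = (best_start, best_end, best_len, current_start)
def pvAStep (target : Int) (st : Int × Int × Int × Option Int) (idx : Int) (count : Int) :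
    Int × Int × Int × Option Int :=
  match st with
  | (bs, be, bl, cs) =>
    if count = target then
      match cs with
      | none => (bs, be, bl, some idx)
      | some _ => st
    else
      match cs with
      | some s =>
        let ce := idx - 1
        let len := ce - s + 1
        if len > bl then (s, ce, len, none) else (bs, be, bl, none)
      | none => st

-- the `for idx, count in enumerate(counts)` loop, idx carried explicitly
def pvALoop (target : Int) : List Int → Int → (Int × Int × Int × Option Int) →
    Int × Int × Int × Option Int
  | [], _, st => st
  | c :: rest, idx, st => pvALoop target rest (idx + 1) (pvAStep target st idx c)

def find_longest_run_py (counts : List Int) (target : Int) : Int × Int :=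
  match pvALoop target counts 0 (-1, -1, 0, none) with
  | (bs, be, bl, cs) =>
    let fin : Int × Int × Int :=
      match cs with
      | some s =>
        let ce := (counts.length : Int) - 1
        let len := ce - s + 1
        if len > bl then (s, ce, len) else (bs, be, bl)
      | none => (bs, be, bl)
    if fin.2.2 = 0 then (-1, -1) else (fin.1, fin.2.1)

-- ===== PORT B =====
-- length of the maximal run of value c at the head of the list (B's inner `while j < n`)
def pvRunLen (c : Int) : List Int → Nat
  | [] => 0
  | x :: xs => if x = c then 1 + pvRunLen c xs else 0

lemma pvRunLen_drop_lt (c : Int) (rest : List Int) :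
    (rest.drop (pvRunLen c rest)).length < (c :: rest).length := by
  simp only [List.length_drop, List.length_cons]; omega

-- B's outer `while i < n`: one iteration per maximal run
def pvAltGo (target : Int) : List Int → Int → (Int × Int × Int) → Int × Int
  | [], _, best => (best.1, best.2.1)
  | c :: rest, start, (bs, be, bl) =>
    let k := pvRunLen c rest
    let len : Int := 1 + (k : Int)
    let best' := if c = target ∧ len > bl then (start, start + len - 1, len) else (bs, be, bl)
    pvAltGo target (rest.drop k) (start + len) best'
termination_by l => l.length
decreasing_by exact pvRunLen_drop_lt c rest

def find_longest_run_py_alt (counts : List Int) (target : Int) : Int × Int :=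
  pvAltGo target counts 0 (-1, -1, 0)

-- ===== PRECONDITION & SPEC =====
def Spec_find_longest_run_py (counts : List Int) (target : Int) (out : Int × Int) : Prop := out = find_longest_run_py_alt counts target
instance (counts : List Int) (target : Int) (out : Int × Int) : Decidable (Spec_find_longest_run_py counts target out) := by unfold Spec_find_longest_run_py; infer_instance

-- ===== CLAIM (what is proved, stated in full; the proofs are below) =====
def Claim_equal_find_longest_run_py : Prop := ∀ (counts : List Int) (target : Int), Dom_find_longest_run_py counts target → Spec_find_longest_run_py counts target (find_longest_run_py counts target)

-- ===== LEMMAS AND PROOFS =====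

-- A's loop over the remaining list at generalized start index, followed by A's post-loop flush
def pvAFin (target : Int) (l : List Int) (i : Int) (st : Int × Int × Int × Option Int) :
    Int × Int :=
  match pvALoop target l i st with
  | (bs, be, bl, cs) =>
    let fin : Int × Int × Int :=
      match cs with
      | some s =>
        let ce := i + (l.length : Int) - 1
        let len := ce - s + 1
        if len > bl then (s, ce, len) else (bs, be, bl)
      | none => (bs, be, bl)
    if fin.2.2 = 0 then (-1, -1) else (fin.1, fin.2.1)

lemma pvAFin_spec (target : Int) (counts : List Int) :
    find_longest_run_py counts target = pvAFin target counts 0 (-1, -1, 0, none) := by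
  simp [find_longest_run_py, pvAFin]

lemma pvALoop_append (target : Int) (l1 l2 : List Int) (i : Int)
    (st : Int × Int × Int × Option Int) :
    pvALoop target (l1 ++ l2) i st
      = pvALoop target l2 (i + (l1.length : Int)) (pvALoop target l1 i st) := by
  induction l1 generalizing i st with
  | nil => simp [pvALoop]
  | cons c rest ih =>
    simp only [List.cons_append, pvALoop, ih, List.length_cons]
    congr 1
    push_cast
    ring

-- run of non-target values with no open run: the state is unchanged
lemma pvALoop_ne (target : Int) (l : List Int) (h : ∀ x ∈ l, x ≠ target) (i bs be bl : Int) :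
    pvALoop target l i (bs, be, bl, none) = (bs, be, bl, none) := by
  induction l generalizing i with
  | nil => rfl
  | cons c rest ih =>
    have hc : c ≠ target := h c (by simp)
    simp only [pvALoop, pvAStep, if_neg hc]
    exact ih (fun x hx => h x (by simp [hx])) (i + 1)

-- run of target values with an open run: the state is unchanged
lemma pvALoop_eq_some (target : Int) (l : List Int) (h : ∀ x ∈ l, x = target)
    (i bs be bl s : Int) :
    pvALoop target l i (bs, be, bl, some s) = (bs, be, bl, some s) := by
  induction l generalizing i with
  | nil => rfl
  | cons c rest ih =>
    have hc : c = target := h c (by simp)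
    simp only [pvALoop, pvAStep, if_pos hc]
    exact ih (fun x hx => h x (by simp [hx])) (i + 1)

lemma pvRunLen_cons_eq (c y : Int) (ys : List Int) (hy : y = c) :
    pvRunLen c (y :: ys) = pvRunLen c ys + 1 := by
  simp [pvRunLen, hy]; omega

lemma pvRunLen_cons_ne (c y : Int) (ys : List Int) (hy : ¬ y = c) :
    pvRunLen c (y :: ys) = 0 := by
  simp [pvRunLen, hy]

lemma pvRunLen_le (c : Int) (l : List Int) : pvRunLen c l ≤ l.length := by
  induction l with
  | nil => simp [pvRunLen]
  | cons y ys ih =>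
    by_cases hy : y = c
    · rw [pvRunLen_cons_eq c y ys hy]; simp; omega
    · rw [pvRunLen_cons_ne c y ys hy]; simp

lemma pvRunLen_take (c : Int) (l : List Int) : ∀ x ∈ l.take (pvRunLen c l), x = c := by
  induction l with
  | nil => simp
  | cons y ys ih =>
    by_cases hy : y = c
    · rw [pvRunLen_cons_eq c y ys hy, List.take_succ_cons]
      intro x hx
      rcases List.mem_cons.mp hx with h | h
      · exact h.trans hy
      · exact ih x h
    · rw [pvRunLen_cons_ne c y ys hy]
      simp

lemma pvRunLen_drop (c : Int) (l : List Int) :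
    l.drop (pvRunLen c l) = [] ∨ ∃ d rest, l.drop (pvRunLen c l) = d :: rest ∧ d ≠ c := by
  induction l with
  | nil => exact Or.inl rfl
  | cons y ys ih =>
    by_cases hy : y = c
    · rw [pvRunLen_cons_eq c y ys hy, List.drop_succ_cons]
      exact ih
    · rw [pvRunLen_cons_ne c y ys hy]
      exact Or.inr ⟨y, ys, rfl, hy⟩

set_option maxHeartbeats 2000000 in
-- the main invariant: from a clean state (no open run, consistent best), A's remaining
-- work followed by its flush equals B's run-splitting scan of the same suffix
lemma pvMain (target : Int) (n : Nat) : ∀ (l : List Int), l.length ≤ n →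
    ∀ (i bs be bl : Int), 0 ≤ bl → (bl = 0 → bs = -1 ∧ be = -1) →
    pvAFin target l i (bs, be, bl, none) = pvAltGo target l i (bs, be, bl) := by
  induction n with
  | zero =>
    intro l hl i bs be bl _ hinv
    have hnil : l = [] := List.length_eq_zero_iff.mp (by omega)
    subst hnil
    simp only [pvAFin, pvALoop, pvAltGo]
    split_ifs with h0
    · rcases hinv h0 with ⟨h1, h2⟩; simp [h1, h2]
    · rfl
  | succ n ih =>
    intro l hl i bs be bl hbl hinv
    cases l with
    | nil =>
      simp only [pvAFin, pvALoop, pvAltGo]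
      split_ifs with h0
      · rcases hinv h0 with ⟨h1, h2⟩; simp [h1, h2]
      · rfl
    | cons c rest =>
      set k := pvRunLen c rest with hk
      have hklen : k ≤ rest.length := pvRunLen_le c rest
      have hsplit : c :: rest = (c :: rest.take k) ++ rest.drop k := by
        simp [List.take_append_drop]
      have htake : ∀ x ∈ rest.take k, x = c := pvRunLen_take c rest
      have hlen1 : (((c :: rest.take k).length : Nat) : Int) = (k : Int) + 1 := by
        simp [List.length_take]
        omega
      -- B's step
      have hB : pvAltGo target (c :: rest) i (bs, be, bl)
          = pvAltGo target (rest.drop k) (i + (1 + (k : Int)))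
              (if c = target ∧ 1 + (k : Int) > bl then (i, i + (1 + (k : Int)) - 1, 1 + (k : Int))
               else (bs, be, bl)) := by
        rw [pvAltGo]
      by_cases hct : c = target
      · -- the head run is a target run; A opens current_start = i across it
        have hloop1 : pvALoop target (c :: rest.take k) i (bs, be, bl, none)
            = (bs, be, bl, some i) := by
          simp only [pvALoop, pvAStep, if_pos hct]
          exact pvALoop_eq_some target (rest.take k)
            (fun x hx => (htake x hx).trans hct) (i + 1) bs be bl i
        rcases pvRunLen_drop c rest with hnil | ⟨d, rest'', hd, hdc⟩
        · -- list ends inside the target run: A's post-loop flush fires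
          have hfin : c :: rest = (c :: rest.take k) := by
            rw [hsplit, hnil, List.append_nil]
          rw [hB, hnil, hfin]
          simp only [pvAFin, hloop1, hlen1, pvAltGo]
          have hcond : (i + ((k : Int) + 1) - 1 - i + 1) = 1 + (k : Int) := by ring
          rw [hcond]
          simp only [hct, true_and]
          by_cases hgt : 1 + (k : Int) > bl
          · rw [if_pos hgt, if_pos hgt, if_neg (by simp; omega)]
            simp [Prod.ext_iff]
            ring
          · rw [if_neg hgt, if_neg hgt]
            split_ifs with h0
            · rcases hinv h0 with ⟨e1, e2⟩
              simp [e1, e2]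
            · rfl
        · -- the run is closed by element d ≠ target; A flushes at d, then both continue
          have hdt : d ≠ target := fun h => hdc (h.trans hct.symm)
          have hdlen : (d :: rest'').length ≤ n := by
            have h1 : (rest.drop k).length = rest.length - k := by simp
            have h2 : (d :: rest'').length = rest.length - k := by rw [← hd, h1]
            simp only [List.length_cons] at h2 hl ⊢
            omega
          obtain ⟨nbs, nbe, nbl, h4⟩ :
              ∃ nbs nbe nbl, (if 1 + (k : Int) > bl then ((i : Int), i + (k : Int), 1 + (k : Int))
                else (bs, be, bl)) = (nbs, nbe, nbl) := by
            exact ⟨_, _, _, rfl⟩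
          have hinvn : 0 ≤ nbl ∧ (nbl = 0 → nbs = -1 ∧ nbe = -1) := by
            split_ifs at h4 with hc1
            · simp only [Prod.mk.injEq] at h4
              obtain ⟨e1, e2, e3⟩ := h4
              constructor
              · omega
              · omega
            · simp only [Prod.mk.injEq] at h4
              obtain ⟨e1, e2, e3⟩ := h4
              subst e1; subst e2; subst e3
              exact ⟨hbl, hinv⟩
          have hAeq : pvAFin target (c :: rest) i (bs, be, bl, none)
              = pvAFin target rest'' (i + (k : Int) + 2) (nbs, nbe, nbl, none) := by
            simp only [pvAFin]
            rw [hsplit, hd, pvALoop_append, hloop1, hlen1]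
            simp only [pvALoop, pvAStep, if_neg hdt]
            have h1 : i + ((k : Int) + 1) - 1 - i + 1 = 1 + (k : Int) := by ring
            have e0 : i + ((k : Int) + 1) - 1 = i + (k : Int) := by ring
            have h2 : i + ((k : Int) + 1) + 1 = i + (k : Int) + 2 := by ring
            rw [h1, e0, h2]
            have hstate : (if 1 + (k : Int) > bl
                  then ((i : Int), i + (k : Int), 1 + (k : Int), (none : Option Int))
                  else (bs, be, bl, none))
                = (nbs, nbe, nbl, none) := by
              split_ifs at h4 ⊢ with hc1 <;> simp_all <;> omega
            rw [hstate]
            have h3 : i + ((((c :: rest.take k) ++ d :: rest'').length : Nat) : Int) - 1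
                = i + (k : Int) + 2 + ((rest''.length : Nat) : Int) - 1 := by
              simp [List.length_take]
              push_cast
              omega
            simp only [h3]
          have hno : pvAFin target (d :: rest'') (i + (k : Int) + 1) (nbs, nbe, nbl, none)
              = pvAFin target rest'' (i + (k : Int) + 2) (nbs, nbe, nbl, none) := by
            simp only [pvAFin, pvALoop, pvAStep, if_neg hdt]
            have h2 : i + (k : Int) + 1 + 1 = i + (k : Int) + 2 := by ring
            rw [h2]
            have h3 : i + (k : Int) + 1 + (((d :: rest'').length : Nat) : Int) - 1
                = i + (k : Int) + 2 + ((rest''.length : Nat) : Int) - 1 := by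
              simp
              omega
            simp only [h3]
          have hIH := ih (d :: rest'') hdlen (i + (k : Int) + 1) nbs nbe nbl hinvn.1 hinvn.2
          have hBside : pvAltGo target (c :: rest) i (bs, be, bl)
              = pvAltGo target (d :: rest'') (i + (k : Int) + 1) (nbs, nbe, nbl) := by
            rw [hB, hd]
            have e1 : i + (1 + (k : Int)) = i + (k : Int) + 1 := by ring
            rw [e1]
            have e2 : i + (k : Int) + 1 - 1 = i + (k : Int) := by ring
            rw [e2]
            simp only [hct, true_and]
            rw [h4]
          rw [hAeq, hBside, ← hIH, hno]
      · -- non-target run at the head: neither side changes the best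
        have hloop1 : pvALoop target (c :: rest.take k) i (bs, be, bl, none)
            = (bs, be, bl, none) :=
          pvALoop_ne target (c :: rest.take k)
            (fun x hx => by
              rcases List.mem_cons.mp hx with h | h
              · rw [h]; exact hct
              · rw [htake x h]; exact hct) i bs be bl
        have hAeq : pvAFin target (c :: rest) i (bs, be, bl, none)
            = pvAFin target (rest.drop k) (i + (1 + (k : Int))) (bs, be, bl, none) := by
          simp only [pvAFin]
          rw [hsplit, pvALoop_append, hloop1, hlen1]
          have e1 : i + ((k : Int) + 1) = i + (1 + (k : Int)) := by ring
          rw [e1]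
          have h3 : i + ((((c :: rest.take k) ++ rest.drop k).length : Nat) : Int) - 1
              = i + (1 + (k : Int)) + (((rest.drop k).length : Nat) : Int) - 1 := by
            simp [List.length_drop]
            push_cast
            omega
          simp only [h3]
        rw [hAeq, hB, if_neg (fun hh : c = target ∧ _ => hct hh.1)]
        exact ih (rest.drop k) (by simp only [List.length_drop, List.length_cons] at hl ⊢; omega) (i + (1 + (k : Int))) bs be bl hbl hinv

-- ===== VERDICT (by name: the statement is the Claim_ definition above) =====
theorem find_longest_run_py_spec : Claim_equal_find_longest_run_py := by
  intro counts target _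
  unfold Spec_find_longest_run_py find_longest_run_py_alt
  rw [pvAFin_spec]
  exact pvMain target counts.length counts le_rfl 0 (-1) (-1) 0 le_rfl (fun _ => ⟨rfl, rfl⟩)
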